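-- pv_equiv track=rewrite | github.com/LeanVibe/ant-farm | system_analyzer.py | _find_dependency_cycles
-- ===== SOURCE A (Python) =====
-- from typing import Dict, List, Set, Tuple, Any
--
-- def _find_dependency_cycles(deps: Dict[str, List[str]]) -> List[List[str]]:
--     """Find circular dependencies using DFS."""
--     cycles = []
--     visited = set()
--     rec_stack = set()
--
--     def dfs(node, path):
--         if node in rec_stack:
--             # Found cycle
--             cycle_start = path.index(node)
--             cycles.append(path[cycle_start:] + [node])
--             return
--
--         if node in visited:
--             return
--
--         visited.add(node)
--         rec_stack.add(node)
--         path.append(node)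
--
--         for dep in deps.get(node, []):
--             dfs(dep, path.copy())
--
--         rec_stack.remove(node)
--
--     for file in deps:
--         if file not in visited:
--             dfs(file, [])
--
--     return cycles
-- ===== SOURCE B (Python) =====
-- def _find_dependency_cycles(deps):
--     """Find circular dependencies, iteratively: explicit DFS stack of frames."""
--     cycles = []
--     visited = set()
--     rec_stack = set()
--     for file in deps:
--         if file in visited:
--             continue
--         stack = [("call", file, [])]
--         while stack:
--             tag, node, path = stack.pop()
--             if tag == "finish":
--                 rec_stack.remove(node)
--                 continue
--             if node in rec_stack:
--                 cycle_start = path.index(node)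
--                 cycles.append(path[cycle_start:] + [node])
--                 continue
--             if node in visited:
--                 continue
--             visited.add(node)
--             rec_stack.add(node)
--             new_path = path + [node]
--             stack.append(("finish", node, None))
--             for dep in reversed(deps.get(node, [])):
--                 stack.append(("call", dep, new_path))
--     return cycles
-- ===== Notes on version B (the rewrite author's own statement) =====
-- stated objective: alternative
-- what changed: The recursive DFS (a nested closure mutating shared visited/rec_stack sets, one Python stack frame per node) is replaced by an iterative DFS over an explicit stack of call/finish frames, with finish markers removing nodes from rec_stack in post-order and children pushed in reverse.
import Mathlib
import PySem

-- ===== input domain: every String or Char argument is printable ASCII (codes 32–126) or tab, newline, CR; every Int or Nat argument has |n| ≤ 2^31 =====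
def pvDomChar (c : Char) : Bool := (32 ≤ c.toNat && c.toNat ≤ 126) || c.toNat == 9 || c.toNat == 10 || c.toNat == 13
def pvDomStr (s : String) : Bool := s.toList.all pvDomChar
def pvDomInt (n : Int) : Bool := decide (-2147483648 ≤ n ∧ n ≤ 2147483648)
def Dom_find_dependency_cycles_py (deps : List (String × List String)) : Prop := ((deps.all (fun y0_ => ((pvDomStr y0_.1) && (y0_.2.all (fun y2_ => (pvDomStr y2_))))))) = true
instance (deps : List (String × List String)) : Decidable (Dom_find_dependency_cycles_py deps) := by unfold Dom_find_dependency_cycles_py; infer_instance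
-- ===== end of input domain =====

-- B replaces A's recursive DFS closure by an iterative DFS over an explicit stack of
-- call/finish frames (post-order finish markers), same return value; the Nat fuel in
-- both ports is only a totality guard (never exhausted on real runs: every expansion
-- marks a previously unvisited node visited, so the depth is bounded by the node count).

-- Shared state record: both Python versions maintain visited/rec_stack sets and a cycles list.
structure DfsSt where
  visited : PySem.Set String
  recs : PySem.Set String
  cycles : List (List String)
deriving Repr, DecidableEq

-- ===== PORT A =====
-- recursive dfs(node, path); the for-loop over deps.get(node, []) is the foldl over the children.
def dfsA (deps : List (String × List String)) : Nat → String → List String → DfsSt → DfsSt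
  | f, node, path, s =>
    if PySem.Set.contains s.recs node then
      match PySem.List.index? path node with
      | some i => { s with cycles := s.cycles ++ [path.drop i ++ [node]] }
      | none => s   -- Python list.index would raise ValueError; unreachable (a rec_stack node always lies on the passed path)
    else if PySem.Set.contains s.visited node then s
    else
      match f with
      | 0 => s      -- fuel guard only; never reached with the fuel the main loop passes
      | f' + 1 =>
        let s1 : DfsSt := { s with visited := PySem.Set.add s.visited node, recs := PySem.Set.add s.recs node }
        let s2 := ((PySem.Dict.mk deps).getD node []).foldl
          (fun st d => dfsA deps f' d (path ++ [node]) st) s1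
        { s2 with recs := (PySem.Set.remove? s2.recs node).getD s2.recs }   -- set.remove; never a KeyError here

def find_dependency_cycles_py (deps : List (String × List String)) : List (List String) :=
  let fuel := deps.length + (deps.map (fun p => p.2.length)).sum + 1
  (deps.foldl
    (fun s kv => if PySem.Set.contains s.visited kv.1 then s else dfsA deps fuel kv.1 [] s)
    ⟨PySem.Set.empty, PySem.Set.empty, []⟩).cycles

-- ===== PORT B =====
-- explicit stack of frames; a call frame carries (node, path) plus its fuel bound (totality guard).
inductive PvFrame where
  | call : String → List String → Nat → PvFrame
  | finish : String → PvFrame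
deriving Repr, DecidableEq

-- termination helpers for runB (cited in its decreasing_by)
def pvMaxChild (deps : List (String × List String)) : Nat :=
  (deps.map (fun p => p.2.length)).foldr max 0

def pvWeight (b : Nat) : PvFrame → Nat
  | .finish _ => 1
  | .call _ _ f => (b + 2) ^ (f + 1)

def pvStackW (b : Nat) (K : List PvFrame) : Nat := (K.map (pvWeight b)).sum

theorem pvWeight_pos (b : Nat) (fr : PvFrame) : 1 ≤ pvWeight b fr := by
  cases fr with
  | finish _ => simp [pvWeight]
  | call _ _ f => exact Nat.one_le_pow _ _ (by omega)

theorem pvStackW_lt_cons (b : Nat) (fr : PvFrame) (K : List PvFrame) :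
    pvStackW b K < pvStackW b (fr :: K) := by
  simp only [pvStackW, List.map_cons, List.sum_cons]
  have := pvWeight_pos b fr; omega

theorem pvGetD_len_le (deps : List (String × List String)) (n : String) :
    ((PySem.Dict.mk deps).getD n []).length ≤ pvMaxChild deps := by
  induction deps with
  | nil => simp [PySem.Dict.getD_eq_get?_getD, PySem.Dict.get?, pvMaxChild]
  | cons p rest ih =>
    rw [pvMaxChild, List.map_cons, List.foldr_cons]
    rw [PySem.Dict.getD_eq_get?_getD, PySem.Dict.get?_mk_cons]
    by_cases h : (p.1 == n) = true
    · simp [h]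
    · rw [if_neg h, ← PySem.Dict.getD_eq_get?_getD]
      exact le_trans (by simpa [pvMaxChild] using ih) (le_max_right _ _)

theorem pvArith (b len f W : Nat) (hlen : len ≤ b) :
    len * (b + 2) ^ (f + 1) + (1 + W) < (b + 2) ^ (f + 1 + 1) + W := by
  have hx : (1 : Nat) ≤ (b + 2) ^ (f + 1) := Nat.one_le_pow _ _ (by omega)
  have h1 : len * (b + 2) ^ (f + 1) + 1 < (b + 2) ^ (f + 1 + 1) := by
    have h2 : (b + 2) ^ (f + 1 + 1) = (b + 2) ^ (f + 1) * (b + 2) := pow_succ _ _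
    nlinarith
  omega

theorem pvStackW_expand (deps : List (String × List String)) (n : String) (p : List String)
    (f' : Nat) (K' : List PvFrame) :
    pvStackW (pvMaxChild deps)
        ((((PySem.Dict.mk deps).getD n []).map (fun d => PvFrame.call d (p ++ [n]) f'))
          ++ PvFrame.finish n :: K')
      < pvStackW (pvMaxChild deps) (PvFrame.call n p (f' + 1) :: K') := by
  simp only [pvStackW, List.map_cons, List.map_append, List.sum_cons, List.sum_append, List.map_map]
  have hmap : (List.map (pvWeight (pvMaxChild deps) ∘ fun d => PvFrame.call d (p ++ [n]) f')
      ((PySem.Dict.mk deps).getD n [])) =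
      List.map (fun _ => (pvMaxChild deps + 2) ^ (f' + 1)) ((PySem.Dict.mk deps).getD n []) := by
    simp [Function.comp_def, pvWeight]
  rw [hmap, List.map_const', List.sum_replicate, smul_eq_mul]
  have hw : pvWeight (pvMaxChild deps) (PvFrame.call n p (f' + 1)) = (pvMaxChild deps + 2) ^ (f' + 1 + 1) := rfl
  rw [hw]
  exact pvArith _ _ _ _ (pvGetD_len_le deps n)

def runB (deps : List (String × List String)) (K : List PvFrame) (s : DfsSt) : DfsSt :=
  match K with
  | [] => s
  | .finish n :: K' => runB deps K' { s with recs := (PySem.Set.remove? s.recs n).getD s.recs }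
  | .call n p f :: K' =>
    if PySem.Set.contains s.recs n then
      match PySem.List.index? p n with
      | some i => runB deps K' { s with cycles := s.cycles ++ [p.drop i ++ [n]] }
      | none => runB deps K' s   -- unreachable ValueError branch, as in port A
    else if PySem.Set.contains s.visited n then runB deps K' s
    else
      match f with
      | 0 => runB deps K' s      -- fuel guard only
      | f' + 1 =>
        runB deps
          ((((PySem.Dict.mk deps).getD n []).map (fun d => PvFrame.call d (p ++ [n]) f')) ++ PvFrame.finish n :: K')
          { s with visited := PySem.Set.add s.visited n, recs := PySem.Set.add s.recs n }
termination_by pvStackW (pvMaxChild deps) K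
decreasing_by
  all_goals first
    | exact pvStackW_lt_cons _ _ _
    | exact pvStackW_expand deps _ _ _ _

def find_dependency_cycles_py_alt (deps : List (String × List String)) : List (List String) :=
  let fuel := deps.length + (deps.map (fun p => p.2.length)).sum + 1
  (deps.foldl
    (fun s kv => if PySem.Set.contains s.visited kv.1 then s
                 else runB deps [PvFrame.call kv.1 [] fuel] s)
    ⟨PySem.Set.empty, PySem.Set.empty, []⟩).cycles

-- ===== PRECONDITION & SPEC =====
def Spec_find_dependency_cycles_py (deps : List (String × List String)) (out : List (List String)) : Prop := out = find_dependency_cycles_py_alt deps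
instance (deps : List (String × List String)) (out : List (List String)) : Decidable (Spec_find_dependency_cycles_py deps out) := by unfold Spec_find_dependency_cycles_py; infer_instance

-- ===== CLAIM (what is proved, stated in full; the proofs are below) =====
def Claim_equal_find_dependency_cycles_py : Prop := ∀ (deps : List (String × List String)), Dom_find_dependency_cycles_py deps → Spec_find_dependency_cycles_py deps (find_dependency_cycles_py deps)

-- ===== LEMMAS AND PROOFS =====

-- Bridge: popping one call frame and then running the rest of the stack equals
-- running A's recursive dfs on that (node, path) and then the rest of the stack;
-- proved together with its version for a block of call frames (one per child).
theorem pvBridge (deps : List (String × List String)) :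
    ∀ f : Nat,
      (∀ (n : String) (p : List String) (K : List PvFrame) (s : DfsSt),
        runB deps (PvFrame.call n p f :: K) s = runB deps K (dfsA deps f n p s)) ∧
      (∀ (cs p : List String) (K : List PvFrame) (s : DfsSt),
        runB deps (cs.map (fun d => PvFrame.call d p f) ++ K) s
          = runB deps K (cs.foldl (fun st d => dfsA deps f d p st) s)) := by
  intro f
  induction f with
  | zero =>
    have hcall : ∀ (n : String) (p : List String) (K : List PvFrame) (s : DfsSt),
        runB deps (PvFrame.call n p 0 :: K) s = runB deps K (dfsA deps 0 n p s) := by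
      intro n p K s
      rw [runB, dfsA]
      by_cases hr : PySem.Set.contains s.recs n = true
      · rw [if_pos hr, if_pos hr]
        cases PySem.List.index? p n <;> simp
      · rw [if_neg hr, if_neg hr]
        by_cases hv : PySem.Set.contains s.visited n = true
        · rw [if_pos hv, if_pos hv]
        · rw [if_neg hv, if_neg hv]
    refine ⟨hcall, ?_⟩
    intro cs
    induction cs with
    | nil => intro p K s; simp
    | cons c cs' ih =>
      intro p K s
      rw [List.map_cons, List.cons_append, hcall, List.foldl_cons]
      exact ih p K (dfsA deps 0 c p s)
  | succ f' ihf =>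
    have hcall : ∀ (n : String) (p : List String) (K : List PvFrame) (s : DfsSt),
        runB deps (PvFrame.call n p (f' + 1) :: K) s = runB deps K (dfsA deps (f' + 1) n p s) := by
      intro n p K s
      rw [runB, dfsA]
      by_cases hr : PySem.Set.contains s.recs n = true
      · rw [if_pos hr, if_pos hr]
        cases PySem.List.index? p n <;> simp
      · rw [if_neg hr, if_neg hr]
        by_cases hv : PySem.Set.contains s.visited n = true
        · rw [if_pos hv, if_pos hv]
        · rw [if_neg hv, if_neg hv]
          rw [ihf.2 ((PySem.Dict.mk deps).getD n []) (p ++ [n]) (PvFrame.finish n :: K)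
            { s with visited := PySem.Set.add s.visited n, recs := PySem.Set.add s.recs n }]
          rw [runB]
    refine ⟨hcall, ?_⟩
    intro cs
    induction cs with
    | nil => intro p K s; simp
    | cons c cs' ih =>
      intro p K s
      rw [List.map_cons, List.cons_append, hcall, List.foldl_cons]
      exact ih p K (dfsA deps (f' + 1) c p s)

theorem pvMains_eq (deps : List (String × List String)) :
    find_dependency_cycles_py deps = find_dependency_cycles_py_alt deps := by
  show (deps.foldl
      (fun s kv => if PySem.Set.contains s.visited kv.1 then s
        else dfsA deps (deps.length + (deps.map (fun p => p.2.length)).sum + 1) kv.1 [] s)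
      ⟨PySem.Set.empty, PySem.Set.empty, []⟩).cycles
    = (deps.foldl
      (fun s kv => if PySem.Set.contains s.visited kv.1 then s
        else runB deps [PvFrame.call kv.1 [] (deps.length + (deps.map (fun p => p.2.length)).sum + 1)] s)
      ⟨PySem.Set.empty, PySem.Set.empty, []⟩).cycles
  have hfun : (fun (s : DfsSt) (kv : String × List String) =>
        if PySem.Set.contains s.visited kv.1 then s
        else dfsA deps (deps.length + (deps.map (fun p => p.2.length)).sum + 1) kv.1 [] s)
      = (fun (s : DfsSt) (kv : String × List String) =>
        if PySem.Set.contains s.visited kv.1 then s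
        else runB deps [PvFrame.call kv.1 [] (deps.length + (deps.map (fun p => p.2.length)).sum + 1)] s) := by
    funext s kv
    by_cases h : PySem.Set.contains s.visited kv.1 = true
    · rw [if_pos h, if_pos h]
    · rw [if_neg h, if_neg h]
      rw [show ([PvFrame.call kv.1 [] (deps.length + (deps.map (fun p => p.2.length)).sum + 1)] : List PvFrame)
            = PvFrame.call kv.1 [] (deps.length + (deps.map (fun p => p.2.length)).sum + 1) :: [] from rfl,
        (pvBridge deps _).1, runB]
  rw [hfun]

-- ===== VERDICT (by name: the statement is the Claim_ definition above) =====
theorem find_dependency_cycles_py_spec : Claim_equal_find_dependency_cycles_py := by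
  intro deps _
  unfold Spec_find_dependency_cycles_py
  exact pvMains_eq deps
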